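-- pv_equiv track=rewrite | github.com/borumea/Network-Topology-Scanner | network-topology-mapper/backend/app/services/scanner/connection_inference.py | _deduplicate_connections
-- ===== SOURCE A (Python) =====
-- def _deduplicate_connections(
--
--     scored_connections: list[tuple[int, dict]],
-- ) -> list[dict]:
--     """
--     Remove duplicate edges. Connections are undirected at the physical
--     layer, so A->B and B->A are the same edge.
--
--     When duplicates exist, keep the one with higher priority
--     (LLDP > switch-aware > gateway).
--     """
--     best: dict[frozenset, tuple[int, dict]] = {}
--
--     for priority, conn in scored_connections:
--         key = frozenset({conn["source_id"], conn["target_id"]})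
--
--         # Skip self-loops
--         if conn["source_id"] == conn["target_id"]:
--             continue
--
--         if key not in best or priority > best[key][0]:
--             best[key] = (priority, conn)
--
--     return [conn for _, conn in best.values()]
-- ===== SOURCE B (Python) =====
-- def _deduplicate_connections(
--     scored_connections: list[tuple[int, dict]],
-- ) -> list[dict]:
--     """Dict-free staged passes: drop self-loops, collect undirected edge
--     keys in first-appearance order, then pick each edge's first
--     highest-priority entry with max()."""
--     def key(conn):
--         a, b = conn["source_id"], conn["target_id"]
--         return (a, b) if a <= b else (b, a)
--
--     real = [pc for pc in scored_connections
--             if pc[1]["source_id"] != pc[1]["target_id"]]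
--
--     keys = []
--     for _, conn in real:
--         k = key(conn)
--         if k not in keys:
--             keys.append(k)
--
--     return [max((pc for pc in real if key(pc[1]) == k),
--                 key=lambda pc: pc[0])[1]
--             for k in keys]
-- ===== Notes on version B (the rewrite author's own statement) =====
-- stated objective: alternative
-- what changed: Replaces A's single-pass best-so-far dict (compare-and-overwrite per entry) by a dict-free staged pipeline: filter out self-loops, collect distinct undirected-edge keys in first-appearance order, then for each key scan the filtered list with max() (first maximal, matching A's strict '>' tie-break).
import Mathlib
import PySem

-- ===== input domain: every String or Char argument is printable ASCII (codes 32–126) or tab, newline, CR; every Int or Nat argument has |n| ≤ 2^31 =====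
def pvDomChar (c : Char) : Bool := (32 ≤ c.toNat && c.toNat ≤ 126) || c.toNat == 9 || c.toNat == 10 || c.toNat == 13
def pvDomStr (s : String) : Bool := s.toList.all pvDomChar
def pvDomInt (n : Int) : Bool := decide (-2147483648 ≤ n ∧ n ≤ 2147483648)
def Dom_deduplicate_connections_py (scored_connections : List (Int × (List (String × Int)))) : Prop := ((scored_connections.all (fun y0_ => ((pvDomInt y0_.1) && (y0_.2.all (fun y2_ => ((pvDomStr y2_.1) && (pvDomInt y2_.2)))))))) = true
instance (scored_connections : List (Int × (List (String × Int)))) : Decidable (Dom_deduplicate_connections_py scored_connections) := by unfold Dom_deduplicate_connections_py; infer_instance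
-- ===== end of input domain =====

-- B replaces A's one-pass best-so-far dict by a dict-free staged pipeline:
-- filter self-loops, collect distinct edge keys in first-appearance order,
-- then pick each edge's first highest-priority entry with max().

-- shared helper: conn["k"] (first match; total form, under Pre_ the key is present)
def pvGetId (conn : List (String × Int)) (k : String) : Int :=
  (List.lookup k conn).getD 0

-- ===== PORT A =====
-- frozenset {s, t} for s ≠ t, modelled as the ordered pair (exact for 2-element sets)
def pvKey (s t : Int) : Int × Int := if s ≤ t then (s, t) else (t, s)

def pvStepA (best : PySem.Dict (Int × Int) (Int × List (String × Int)))
    (pc : Int × List (String × Int)) : PySem.Dict (Int × Int) (Int × List (String × Int)) :=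
  let s := pvGetId pc.2 "source_id"
  let t := pvGetId pc.2 "target_id"
  if s = t then best
  else
    match best.get? (pvKey s t) with
    | none => best.insert (pvKey s t) pc
    | some b => if pc.1 > b.1 then best.insert (pvKey s t) pc else best

def deduplicate_connections_py (scored_connections : List (Int × (List (String × Int)))) : List (List (String × Int)) :=
  ((scored_connections.foldl pvStepA PySem.Dict.empty).values).map (fun b => b.2)

-- ===== PORT B =====
-- B's local 'key(conn)': the undirected-edge key as a sorted pair
def pvKeyB (conn : List (String × Int)) : Int × Int :=
  let a := pvGetId conn "source_id"
  let b := pvGetId conn "target_id"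
  if a ≤ b then (a, b) else (b, a)

def deduplicate_connections_py_alt (scored_connections : List (Int × (List (String × Int)))) : List (List (String × Int)) :=
  let real := scored_connections.filter
    (fun pc => pvGetId pc.2 "source_id" != pvGetId pc.2 "target_id")
  let keys := real.foldl (fun ks pc => PySem.Set.add ks (pvKeyB pc.2)) PySem.Set.empty
  -- max(gen, key=pc[0]) keeps the FIRST maximal element; the bucket is never
  -- empty (every key comes from real), so getD's default is unreachable
  keys.map (fun k =>
    ((PySem.List.max? (real.filter (fun pc => pvKeyB pc.2 == k)) (fun pc => pc.1)).getD (0, [])).2)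

-- ===== PRECONDITION & SPEC =====
-- A raises KeyError when a connection dict lacks "source_id" or "target_id"; exactly those inputs are excluded (B raises there too).
def Pre_deduplicate_connections_py (scored_connections : List (Int × (List (String × Int)))) : Prop :=
  (scored_connections.all (fun pc => (List.lookup "source_id" pc.2).isSome && (List.lookup "target_id" pc.2).isSome)) = true
instance (scored_connections : List (Int × (List (String × Int)))) : Decidable (Pre_deduplicate_connections_py scored_connections) := by unfold Pre_deduplicate_connections_py; infer_instance

def pvWitness_deduplicate_connections_py : (List (Int × (List (String × Int)))) :=
  [(2, [("source_id", 0), ("target_id", 1)]), (1, [("source_id", 1), ("target_id", 0)])]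

def Spec_deduplicate_connections_py (scored_connections : List (Int × (List (String × Int)))) (out : List (List (String × Int))) : Prop := out = deduplicate_connections_py_alt scored_connections
instance (scored_connections : List (Int × (List (String × Int)))) (out : List (List (String × Int))) : Decidable (Spec_deduplicate_connections_py scored_connections out) := by unfold Spec_deduplicate_connections_py; infer_instance

-- ===== CLAIM (what is proved, stated in full; the proofs are below) =====
def Claim_equal_deduplicate_connections_py : Prop := ∀ (scored_connections : List (Int × (List (String × Int)))), Dom_deduplicate_connections_py scored_connections → Pre_deduplicate_connections_py scored_connections → Spec_deduplicate_connections_py scored_connections (deduplicate_connections_py scored_connections)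

-- ===== LEMMAS AND PROOFS =====

-- the filtered list, key list and per-key first-maximum B computes, as functions of the input
def pvRealOf (xs : List (Int × List (String × Int))) : List (Int × List (String × Int)) :=
  xs.filter (fun pc => pvGetId pc.2 "source_id" != pvGetId pc.2 "target_id")

def pvKeysOf (xs : List (Int × List (String × Int))) : List (Int × Int) :=
  PySem.Set.ofList ((pvRealOf xs).map (fun pc => pvKeyB pc.2))

def pvPickOf (xs : List (Int × List (String × Int))) (k : Int × Int) : Int × List (String × Int) :=
  (PySem.List.max? ((pvRealOf xs).filter (fun pc => pvKeyB pc.2 == k)) (fun pc => pc.1)).getD (0, [])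

-- A's dict state after the whole fold, reconstructed from B's data
def pvDictOf (xs : List (Int × List (String × Int))) :
    PySem.Dict (Int × Int) (Int × List (String × Int)) :=
  ⟨(pvKeysOf xs).map (fun k => (k, pvPickOf xs k))⟩

theorem pv_get?_mapKeys (l : List (Int × Int)) (f : Int × Int → Int × List (String × Int)) (k : Int × Int) :
    (PySem.Dict.mk (l.map (fun k' => (k', f k')))).get? k = if k ∈ l then some (f k) else none := by
  induction l with
  | nil => rfl
  | cons a t ih =>
    by_cases h : a = k
    · simp [PySem.Dict.get?, h]
    · have hb : (a == k) = false := by simpa using h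
      simp only [List.map_cons, PySem.Dict.get?, List.find?_cons, hb]
      simp only [PySem.Dict.get?] at ih
      rw [ih]
      simp [Ne.symm h]

theorem pv_max?_append {A K : Type} [LT K] [DecidableLT K] (l : List A) (x : A) (key : A → K) :
    PySem.List.max? (l ++ [x]) key =
      match PySem.List.max? l key with
      | none => some x
      | some m => if key m < key x then some x else some m := by
  cases h : PySem.List.max? l key with
  | none =>
    simp only [PySem.List.max?] at h ⊢
    rw [List.foldl_append, h]
    rfl
  | some m =>
    simp only [PySem.List.max?] at h ⊢
    rw [List.foldl_append, h]
    rfl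

theorem pvStepA_dictOf (xs : List (Int × List (String × Int))) (x : Int × List (String × Int)) :
    pvStepA (pvDictOf xs) x = pvDictOf (xs ++ [x]) := by
  by_cases hst : pvGetId x.2 "source_id" = pvGetId x.2 "target_id"
  · have hr : pvRealOf (xs ++ [x]) = pvRealOf xs := by
      simp [pvRealOf, List.filter_append, hst]
    have hskip : pvStepA (pvDictOf xs) x = pvDictOf xs := by simp [pvStepA, hst]
    rw [hskip]
    unfold pvDictOf pvKeysOf pvPickOf
    rw [hr]
  · have hr : pvRealOf (xs ++ [x]) = pvRealOf xs ++ [x] := by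
      simp [pvRealOf, List.filter_append, hst]
    set k0 := pvKeyB x.2 with hk0
    have hkk : pvKey (pvGetId x.2 "source_id") (pvGetId x.2 "target_id") = k0 := rfl
    have hkeys : pvKeysOf (xs ++ [x]) = PySem.Set.add (pvKeysOf xs) k0 := by
      simp only [pvKeysOf, hr, PySem.Set.ofList, List.map_append, List.foldl_append,
        List.map_cons, List.map_nil, List.foldl_cons, List.foldl_nil]
      rw [← hk0]
    have hpick_ne : ∀ k, k ≠ k0 → pvPickOf (xs ++ [x]) k = pvPickOf xs k := by
      intro k hk
      have hb : (pvKeyB x.2 == k) = false := by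
        rw [beq_eq_false_iff_ne]; exact fun h => hk (h ▸ hk0)
      have hf : List.filter (fun pc => pvKeyB pc.2 == k) (pvRealOf xs ++ [x]) =
          List.filter (fun pc => pvKeyB pc.2 == k) (pvRealOf xs) := by
        rw [List.filter_append]; simp [hb]
      rw [pvPickOf, hr, hf, pvPickOf]
    have hpick_k0 : pvPickOf (xs ++ [x]) k0 =
        (match PySem.List.max? ((pvRealOf xs).filter (fun pc => pvKeyB pc.2 == k0)) (fun pc => pc.1) with
         | none => x
         | some m => if m.1 < x.1 then x else m) := by
      have hf : List.filter (fun pc => pvKeyB pc.2 == k0) (pvRealOf xs ++ [x]) =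
          List.filter (fun pc => pvKeyB pc.2 == k0) (pvRealOf xs) ++ [x] := by
        rw [List.filter_append]; simp [hk0]
      rw [pvPickOf, hr, hf, pv_max?_append]
      cases PySem.List.max? (List.filter (fun pc => pvKeyB pc.2 == k0) (pvRealOf xs)) (fun pc => pc.1) with
      | none => rfl
      | some m => by_cases h : m.1 < x.1 <;> simp [h]
    have hget : (pvDictOf xs).get? k0 =
        if k0 ∈ pvKeysOf xs then some (pvPickOf xs k0) else none := pv_get?_mapKeys _ _ _
    by_cases hmem : k0 ∈ pvKeysOf xs
    · -- the key is already present: overwrite in place iff strictly higher priority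
      have hne : ((pvRealOf xs).filter (fun pc => pvKeyB pc.2 == k0)) ≠ [] := by
        simp only [pvKeysOf, PySem.Set.mem_ofList] at hmem
        rcases List.mem_map.mp hmem with ⟨pc, hpc, hkey⟩
        exact List.ne_nil_of_mem (List.mem_filter.mpr ⟨hpc, by simp [hkey]⟩)
      have hgetm : (pvDictOf xs).get? k0 = some (pvPickOf xs k0) := by
        rw [hget, if_pos hmem]
      have hcontains : (pvDictOf xs).contains k0 = true := by
        rw [PySem.Dict.contains_eq_isSome_get?, hgetm]; rfl
      have hadd : PySem.Set.add (pvKeysOf xs) k0 = pvKeysOf xs := by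
        simp [PySem.Set.add, PySem.Set.contains, hmem]
      cases hm' : PySem.List.max? ((pvRealOf xs).filter (fun pc => pvKeyB pc.2 == k0)) (fun pc => pc.1) with
      | none =>
        exact absurd (by simpa [PySem.List.max?_eq_none_iff] using hm') hne
      | some m' =>
        have hpickold : pvPickOf xs k0 = m' := by rw [pvPickOf, hm']; rfl
        have hpk : pvPickOf (xs ++ [x]) k0 = if m'.1 < x.1 then x else m' := by
          rw [hpick_k0, hm']
        unfold pvStepA
        simp only [if_neg hst, hkk, hgetm, hpickold]
        by_cases hgt : x.1 > m'.1
        · rw [if_pos hgt]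
          apply PySem.Dict.ext
          rw [PySem.Dict.items_insert_of_contains _ _ hcontains]
          show ((pvKeysOf xs).map (fun k => (k, pvPickOf xs k))).map _ =
            (pvKeysOf (xs ++ [x])).map (fun k => (k, pvPickOf (xs ++ [x]) k))
          rw [hkeys, hadd, List.map_map]
          apply List.map_congr_left
          intro k _
          by_cases hk : k = k0
          · subst hk
            simp [hpk, show m'.1 < x.1 from hgt]
          · simp [hk, hpick_ne k hk]
        · rw [if_neg hgt]
          apply PySem.Dict.ext
          show ((pvKeysOf xs).map (fun k => (k, pvPickOf xs k))) =
            (pvKeysOf (xs ++ [x])).map (fun k => (k, pvPickOf (xs ++ [x]) k))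
          rw [hkeys, hadd]
          apply List.map_congr_left
          intro k _
          by_cases hk : k = k0
          · subst hk
            rw [hpk, if_neg (by omega), hpickold]
          · rw [hpick_ne k hk]
    · -- fresh key: append
      have hnone : ((pvRealOf xs).filter (fun pc => pvKeyB pc.2 == k0)) = [] := by
        rw [List.filter_eq_nil_iff]
        intro pc hpc hkey
        exact hmem (by
          simp only [pvKeysOf, PySem.Set.mem_ofList]
          exact List.mem_map.mpr ⟨pc, hpc, by simpa using hkey⟩)
      have hgetn : (pvDictOf xs).get? k0 = none := by rw [hget, if_neg hmem]
      have hcontains : (pvDictOf xs).contains k0 = false := by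
        rw [PySem.Dict.contains_eq_isSome_get?, hgetn]; rfl
      have hadd : PySem.Set.add (pvKeysOf xs) k0 = pvKeysOf xs ++ [k0] := by
        simp [PySem.Set.add, PySem.Set.contains, hmem]
      unfold pvStepA
      simp only [if_neg hst, hkk, hgetn]
      apply PySem.Dict.ext
      rw [PySem.Dict.items_insert_of_not_contains _ _ hcontains]
      show ((pvKeysOf xs).map (fun k => (k, pvPickOf xs k))) ++ [(k0, x)] =
        (pvKeysOf (xs ++ [x])).map (fun k => (k, pvPickOf (xs ++ [x]) k))
      rw [hkeys, hadd, List.map_append]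
      congr 1
      · apply List.map_congr_left
        intro k hkmem
        rw [hpick_ne k (fun h => hmem (h ▸ hkmem))]
      · rw [List.map_cons, List.map_nil, hpick_k0, hnone]
        rfl

theorem pvFoldA_eq (xs : List (Int × List (String × Int))) :
    xs.foldl pvStepA PySem.Dict.empty = pvDictOf xs := by
  induction xs using List.reverseRecOn with
  | nil => rfl
  | append_singleton t x ih =>
    rw [List.foldl_append, List.foldl_cons, List.foldl_nil, ih, pvStepA_dictOf]

-- ===== VERDICT (by name: the statement is the Claim_ definition above) =====
theorem deduplicate_connections_py_spec : Claim_equal_deduplicate_connections_py := by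
  intro xs _ _
  show deduplicate_connections_py xs = deduplicate_connections_py_alt xs
  unfold deduplicate_connections_py deduplicate_connections_py_alt
  rw [pvFoldA_eq]
  simp only [pvDictOf, PySem.Dict.values, List.map_map, Function.comp_def]
  rw [show (xs.filter (fun pc => pvGetId pc.2 "source_id" != pvGetId pc.2 "target_id")).foldl
        (fun ks pc => PySem.Set.add ks (pvKeyB pc.2)) PySem.Set.empty = pvKeysOf xs from by
      simp [pvKeysOf, pvRealOf, PySem.Set.ofList, List.foldl_map]]
  rfl
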